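-- pv_equiv track=rewrite | github.com/pypi-data/pypi-mirror-357 | packages/aurelis-cli/aurelis_cli-1.0.0-py3-none-any.whl/aurelis/docs/__init__.py | _parse_exceptions
-- ===== SOURCE A (Python) =====
-- from typing import Dict, List, Optional, Any, Set
--
-- def _parse_exceptions(lines: List[str]) -> List[Dict[str, Any]]:
--     """Parse exception documentation."""
--     exceptions = []
--     current_exception = None
--
--     for line in lines:
--         if ':' in line and not line.startswith(' '):
--             # New exception
--             if current_exception:
--                 exceptions.append(current_exception)
--
--             parts = line.split(':', 1)
--             exc_name = parts[0].strip()
--             exc_desc = parts[1].strip() if len(parts) > 1 else ""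
--
--             current_exception = {
--                 'type': exc_name,
--                 'description': exc_desc
--             }
--         elif current_exception and line.startswith(' '):
--             # Continuation of exception description
--             current_exception['description'] += ' ' + line.strip()
--
--     if current_exception:
--         exceptions.append(current_exception)
--
--     return exceptions
-- ===== SOURCE B (Python) =====
-- from typing import Dict, List, Optional, Any, Set
--
--
-- def _parse_exceptions(lines: List[str]) -> List[Dict[str, Any]]:
--     """Parse exception documentation (two-pass: group lines, then format groups)."""
--     def is_header(line: str) -> bool:
--         return ':' in line and not line.startswith(' ')
--
--     # Pass 1: group the lines into (header, continuation-lines) blocks.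
--     groups = []
--     i, n = 0, len(lines)
--     while i < n:
--         if is_header(lines[i]):
--             j = i + 1
--             while j < n and not is_header(lines[j]):
--                 j += 1
--             groups.append((lines[i], [l for l in lines[i + 1:j] if l.startswith(' ')]))
--             i = j
--         else:
--             i += 1
--
--     # Pass 2: turn each group into its exception dict.
--     result = []
--     for header, conts in groups:
--         name, desc = header.split(':', 1)
--         text = desc.strip()
--         for cont in conts:
--             text += ' ' + cont.strip()
--         result.append({'type': name.strip(), 'description': text})
--     return result
-- ===== Notes on version B (the rewrite author's own statement) =====
-- stated objective: alternative
-- what changed: Replaces A's single stateful loop carrying a mutable current-exception dict with two passes: first group the lines into (header, continuation-lines) blocks, then map each block to its dict.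
import Mathlib
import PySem

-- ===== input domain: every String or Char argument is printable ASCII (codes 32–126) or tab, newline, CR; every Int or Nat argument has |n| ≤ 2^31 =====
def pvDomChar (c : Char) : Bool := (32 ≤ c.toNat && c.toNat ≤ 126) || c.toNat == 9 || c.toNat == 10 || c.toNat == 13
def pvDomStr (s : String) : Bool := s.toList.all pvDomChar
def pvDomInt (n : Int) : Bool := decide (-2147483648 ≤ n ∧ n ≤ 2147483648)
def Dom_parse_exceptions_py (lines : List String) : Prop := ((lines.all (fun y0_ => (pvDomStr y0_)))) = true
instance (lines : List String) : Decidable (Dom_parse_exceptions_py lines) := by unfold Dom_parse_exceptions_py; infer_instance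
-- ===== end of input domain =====

-- B replaces A's single stateful loop (mutable current-exception dict) with two passes:
-- group lines into (header, continuations) blocks, then format each block; alternative decomposition, same cost.


-- ===== PORT A =====
-- one loop iteration of A: state = (exceptions so far, current_exception or none)
def pvStepA (st : List (PySem.Dict String String) × Option (PySem.Dict String String))
    (line : String) : List (PySem.Dict String String) × Option (PySem.Dict String String) :=
  if PySem.Str.isIn ":" line && !(PySem.Str.startswith line " ") then
    let excs := match st.2 with
      | some c => st.1 ++ [c]
      | none => st.1
    let parts := (PySem.Str.splitMax? line ":" 1).getD []   -- sep ":" ≠ "" so splitMax? is `some`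
    let exc_name := PySem.Str.strip (parts.getD 0 "")
    let exc_desc := if parts.length > 1 then PySem.Str.strip (parts.getD 1 "") else ""
    (excs, some (PySem.Dict.ofList [("type", exc_name), ("description", exc_desc)]))
  else if st.2.isSome && PySem.Str.startswith line " " then
    (st.1, st.2.map (fun c => c.modify "description" "" (fun d => d ++ " " ++ PySem.Str.strip line)))
  else st

def parse_exceptions_py (lines : List String) : List (List (String × String)) :=
  let st := lines.foldl pvStepA ([], none)
  let excs : List (PySem.Dict String String) := match st.2 with
    | some c => st.1 ++ [c]
    | none => st.1
  excs.map PySem.Dict.items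

-- ===== PORT B =====
def pvIsHeader (line : String) : Bool :=
  PySem.Str.isIn ":" line && !(PySem.Str.startswith line " ")

-- pass 1: group the lines into (header, continuation-lines) blocks
def pvGroups : List String → List (String × List String)
  | [] => []
  | l :: rest =>
    if pvIsHeader l then
      (l, (rest.takeWhile (fun x => !pvIsHeader x)).filter (fun x => PySem.Str.startswith x " "))
        :: pvGroups (rest.dropWhile (fun x => !pvIsHeader x))
    else pvGroups rest
termination_by ls => ls.length
decreasing_by
  · simpa using Nat.lt_succ_of_le (List.length_dropWhile_le _ _)
  · simp

-- pass 2: format one block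
def pvFmt (g : String × List String) : List (String × String) :=
  let parts := (PySem.Str.splitMax? g.1 ":" 1).getD []
  let text := g.2.foldl (fun t c => t ++ " " ++ PySem.Str.strip c) (PySem.Str.strip (parts.getD 1 ""))
  [("type", PySem.Str.strip (parts.getD 0 "")), ("description", text)]

def parse_exceptions_py_alt (lines : List String) : List (List (String × String)) :=
  (pvGroups lines).map pvFmt

-- ===== PRECONDITION & SPEC =====
def Spec_parse_exceptions_py (lines : List String) (out : List (List (String × String))) : Prop := out = parse_exceptions_py_alt lines
instance (lines : List String) (out : List (List (String × String))) : Decidable (Spec_parse_exceptions_py lines out) := by unfold Spec_parse_exceptions_py; infer_instance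

-- ===== CLAIM (what is proved, stated in full; the proofs are below) =====
def Claim_equal_parse_exceptions_py : Prop := ∀ (lines : List String), Dom_parse_exceptions_py lines → Spec_parse_exceptions_py lines (parse_exceptions_py lines)

-- ===== LEMMAS AND PROOFS =====

-- A's appending of continuations to an open current exception, as a fold
def pvExtend (c : PySem.Dict String String) (conts : List String) : PySem.Dict String String :=
  conts.foldl (fun d l => d.modify "description" "" (fun s => s ++ " " ++ PySem.Str.strip l)) c

-- the dict A opens at a header line
def pvMk (line : String) : PySem.Dict String String :=
  let parts := (PySem.Str.splitMax? line ":" 1).getD []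
  PySem.Dict.ofList [("type", PySem.Str.strip (parts.getD 0 "")),
    ("description", if parts.length > 1 then PySem.Str.strip (parts.getD 1 "") else "")]

theorem pvExtend_items (n d : String) (conts : List String) :
    (pvExtend (PySem.Dict.ofList [("type", n), ("description", d)]) conts).items =
      [("type", n), ("description", conts.foldl (fun t c => t ++ " " ++ PySem.Str.strip c) d)] := by
  induction conts generalizing d with
  | nil => rfl
  | cons c cs ih =>
      have h : (PySem.Dict.ofList [("type", n), ("description", d)]).modify "description" ""
          (fun s => s ++ " " ++ PySem.Str.strip c) =
          PySem.Dict.ofList [("type", n), ("description", d ++ " " ++ PySem.Str.strip c)] := rfl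
      simp only [pvExtend, List.foldl_cons, h]
      exact ih _

theorem pvExtend_nil (c : PySem.Dict String String) : pvExtend c [] = c := rfl

theorem pvExtend_cons (c : PySem.Dict String String) (l : String) (t : List String) :
    pvExtend c (l :: t) =
      pvExtend (c.modify "description" "" (fun s => s ++ " " ++ PySem.Str.strip l)) t := rfl

theorem pvMk_extend_fmt (line : String) (conts : List String) :
    (pvExtend (pvMk line) conts).items = pvFmt (line, conts) := by
  unfold pvMk pvFmt
  rcases hp : (PySem.Str.splitMax? line ":" 1).getD [] with _ | ⟨p0, _ | ⟨p1, ps⟩⟩ <;>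
    simp [pvExtend_items, List.getD]
  · rfl
  · rfl

def pvFinish (st : List (PySem.Dict String String) × Option (PySem.Dict String String)) :
    List (List (String × String)) :=
  (match st.2 with
    | some c => st.1 ++ [c]
    | none => st.1 : List (PySem.Dict String String)).map PySem.Dict.items

theorem pvLoop_inv (ls : List String) (acc : List (PySem.Dict String String))
    (cur : Option (PySem.Dict String String)) :
    pvFinish (ls.foldl pvStepA (acc, cur)) =
      acc.map PySem.Dict.items ++
        (match cur with
          | none => (pvGroups ls).map pvFmt
          | some c =>
              (pvExtend c ((ls.takeWhile (fun x => !pvIsHeader x)).filter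
                  (fun x => PySem.Str.startswith x " "))).items ::
                (pvGroups (ls.dropWhile (fun x => !pvIsHeader x))).map pvFmt) := by
  induction ls generalizing acc cur with
  | nil =>
      cases cur with
      | none => simp [pvFinish, pvGroups]
      | some c => simp [pvFinish, pvExtend, pvGroups]
  | cons l rest ih =>
      by_cases hh : pvIsHeader l = true
      · obtain ⟨ha, hb⟩ : PySem.Chars.isIn [':'] l.toList = true ∧
            PySem.Chars.startswith l.toList [' '] = false := by
          simpa [pvIsHeader] using hh
        have hstep : ∀ cur', pvStepA (acc, cur') l =
            ((match cur' with | some c => acc ++ [c] | none => acc), some (pvMk l)) := by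
          intro cur'; simp [pvStepA, ha, hb, pvMk]
        have hgr : pvGroups (l :: rest) =
            (l, (rest.takeWhile (fun x => !pvIsHeader x)).filter
                (fun x => PySem.Str.startswith x " ")) ::
              pvGroups (rest.dropWhile (fun x => !pvIsHeader x)) := by
          rw [pvGroups]; simp [hh]
        cases cur with
        | none =>
            rw [List.foldl_cons, hstep, ih, hgr]
            simp [pvMk_extend_fmt]
        | some c =>
            have ht : List.takeWhile (fun x => !pvIsHeader x) (l :: rest) = [] := by
              simp [hh]
            have hdh : List.dropWhile (fun x => !pvIsHeader x) (l :: rest) = l :: rest := by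
              simp [hh]
            rw [List.foldl_cons, hstep, ih, ht, hdh, hgr]
            simp [pvMk_extend_fmt, pvExtend_nil]
      · have ht : List.takeWhile (fun x => !pvIsHeader x) (l :: rest) =
            l :: List.takeWhile (fun x => !pvIsHeader x) rest := by
          simp [hh]
        have hd : List.dropWhile (fun x => !pvIsHeader x) (l :: rest) =
            List.dropWhile (fun x => !pvIsHeader x) rest := by
          simp [hh]
        have hgr : pvGroups (l :: rest) = pvGroups rest := by
          rw [pvGroups]; simp [hh]
        have hnot : ¬(PySem.Str.isIn ":" l = true ∧ PySem.Str.startswith l " " = false) := by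
          simpa [pvIsHeader] using hh
        by_cases hsw : PySem.Str.startswith l " " = true
        · have hswC : PySem.Chars.startswith l.toList [' '] = true := by simpa using hsw
          cases cur with
          | none =>
              have hstep : pvStepA (acc, none) l = (acc, none) := by
                simp [pvStepA, hswC]
              rw [List.foldl_cons, hstep, ih, hgr]
          | some c =>
              have hstep : pvStepA (acc, some c) l =
                  (acc, some (c.modify "description" ""
                    (fun d => d ++ " " ++ PySem.Str.strip l))) := by
                simp [pvStepA, hswC]
              rw [List.foldl_cons, hstep, ih, ht, hd]
              rw [List.filter_cons_of_pos (by simpa using hsw)]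
              dsimp only
              rw [pvExtend_cons]
        · have hswC : PySem.Chars.startswith l.toList [' '] = false := by
            simpa using hsw
          have hin : PySem.Chars.isIn [':'] l.toList = false := by
            rcases Bool.eq_false_or_eq_true (PySem.Str.isIn ":" l) with h | h
            · exact absurd ⟨by simpa using h, by simpa using hsw⟩ hnot
            · simpa using h
          cases cur with
          | none =>
              have hstep : pvStepA (acc, none) l = (acc, none) := by
                simp [pvStepA, hin, hswC]
              rw [List.foldl_cons, hstep, ih, hgr]
          | some c =>
              have hstep : pvStepA (acc, some c) l = (acc, some c) := by
                simp [pvStepA, hin, hswC]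
              rw [List.foldl_cons, hstep, ih, ht, hd]
              rw [List.filter_cons_of_neg (by simpa using hsw)]

-- ===== VERDICT (by name: the statement is the Claim_ definition above) =====
theorem parse_exceptions_py_spec : Claim_equal_parse_exceptions_py := by
  intro lines _
  show parse_exceptions_py lines = parse_exceptions_py_alt lines
  have h := pvLoop_inv lines [] none
  simpa [pvFinish, parse_exceptions_py, parse_exceptions_py_alt] using h
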